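-- pv_equiv track=rewrite | github.com/gabiru1/Relat-rios-de-estoque | inventory_report/reports/simple_report.py | generate
-- ===== SOURCE A (Python) =====
-- from collections import Counter
--
-- def generate(products):
--
--     oldest_manufactured = min(
--         product["data_de_fabricacao"]
--         for product in products
--     )
--
--     closer_to_spoiling = min(
--         product["data_de_validade"]
--         for product in products
--     )
--
--     biggest_company = Counter(
--         product["nome_da_empresa"] for product in products
--     ).most_common(1)[0][0]
--
--     return (
--         f"Data de fabricação mais antiga: {oldest_manufactured}\n"
--         f"Data de validade mais próxima: {closer_to_spoiling}\n"
--         f"Empresa com mais produtos: {biggest_company}"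
--     )
-- ===== SOURCE B (Python) =====
-- def generate(products):
--     if not products:
--         raise ValueError("min() arg is an empty sequence")
--     oldest = None
--     closest = None
--     counts = {}
--     for product in products:
--         fab = product["data_de_fabricacao"]
--         val = product["data_de_validade"]
--         name = product["nome_da_empresa"]
--         if oldest is None or fab < oldest:
--             oldest = fab
--         if closest is None or val < closest:
--             closest = val
--         counts[name] = counts.get(name, 0) + 1
--     best_name = None
--     best_count = 0
--     for name, c in counts.items():
--         if c > best_count:
--             best_name = name
--             best_count = c
--     return (
--         f"Data de fabricação mais antiga: {oldest}\n"
--         f"Data de validade mais próxima: {closest}\n"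
--         f"Empresa com mais produtos: {best_name}"
--     )
-- ===== Notes on version B (the rewrite author's own statement) =====
-- stated objective: alternative
-- what changed: A makes three separate passes (two min() generator scans plus a Counter with most_common); B makes a single loop maintaining both running minima and a count dict, then scans the dict once keeping the first company with a strictly greater count.
import Mathlib
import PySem

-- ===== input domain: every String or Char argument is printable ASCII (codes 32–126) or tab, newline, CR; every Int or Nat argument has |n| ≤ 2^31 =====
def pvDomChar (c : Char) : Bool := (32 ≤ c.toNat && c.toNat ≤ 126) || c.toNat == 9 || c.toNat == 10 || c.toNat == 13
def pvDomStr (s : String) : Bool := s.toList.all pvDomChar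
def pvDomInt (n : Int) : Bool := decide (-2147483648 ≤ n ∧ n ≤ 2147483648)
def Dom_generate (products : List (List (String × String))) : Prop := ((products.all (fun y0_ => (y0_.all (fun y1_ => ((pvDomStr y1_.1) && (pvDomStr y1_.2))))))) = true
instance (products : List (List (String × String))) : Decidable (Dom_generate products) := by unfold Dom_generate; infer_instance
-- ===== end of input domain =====

-- B fuses A's three separate passes (two min() scans and a Counter + most_common) into one loop
-- keeping both running minima and a count dict, then picks the first-seen max-count company (objective: alternative).


-- shared helper: Python's product["k"] (dict lookup, first match); the default is never
-- reached inside Pre_generate, which requires the key to be present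
def pvGet (p : List (String × String)) (k : String) : String :=
  ((PySem.Dict.mk p).get? k).getD ""

-- ===== PORT A =====
-- three passes: min over data_de_fabricacao, min over data_de_validade,
-- Counter(names).most_common(1)[0][0] (CPython's most_common(1) is max(items, key=itemgetter(1)),
-- first-seen winner on ties = PySem.List.max?); .getD "" is never reached inside Pre_generate
def generate (products : List (List (String × String))) : String :=
  let oldest_manufactured :=
    (PySem.List.min? (products.map (fun p => pvGet p "data_de_fabricacao")) (fun y => y)).getD ""
  let closer_to_spoiling :=
    (PySem.List.min? (products.map (fun p => pvGet p "data_de_validade")) (fun y => y)).getD ""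
  let biggest_company :=
    ((PySem.List.max? (PySem.Dict.counter (products.map (fun p => pvGet p "nome_da_empresa"))).items (fun kv => kv.2)).map (fun kv => kv.1)).getD ""
  "Data de fabricação mais antiga: " ++ oldest_manufactured ++
  "\nData de validade mais próxima: " ++ closer_to_spoiling ++
  "\nEmpresa com mais produtos: " ++ biggest_company

-- ===== PORT B =====
-- 'if oldest is None or x < oldest: oldest = x'
def pvMinStep (o : Option String) (x : String) : Option String :=
  match o with
  | none => some x
  | some m => if x < m then some x else some m

-- single loop over products, then a loop over the count dict keeping the strictly greater count
def generate_alt (products : List (List (String × String))) : String :=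
  let st := products.foldl
    (fun (s : Option String × Option String × PySem.Dict String Int) p =>
      (pvMinStep s.1 (pvGet p "data_de_fabricacao"),
       pvMinStep s.2.1 (pvGet p "data_de_validade"),
       s.2.2.insert (pvGet p "nome_da_empresa") (s.2.2.getD (pvGet p "nome_da_empresa") 0 + 1)))
    (none, none, PySem.Dict.empty)
  let best := st.2.2.items.foldl
    (fun (b : Option String × Int) kv => if b.2 < kv.2 then (some kv.1, kv.2) else b)
    (none, 0)
  "Data de fabricação mais antiga: " ++ st.1.getD "" ++
  "\nData de validade mais próxima: " ++ st.2.1.getD "" ++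
  "\nEmpresa com mais produtos: " ++ best.1.getD ""

-- ===== PRECONDITION & SPEC =====
-- Pre_ excludes exactly the inputs on which A raises: the empty list (min() raises ValueError)
-- and products missing one of the three keys (KeyError)
def Pre_generate (products : List (List (String × String))) : Prop :=
  products ≠ [] ∧ ∀ p ∈ products,
    (PySem.Dict.mk p).contains "data_de_fabricacao" = true ∧
    (PySem.Dict.mk p).contains "data_de_validade" = true ∧
    (PySem.Dict.mk p).contains "nome_da_empresa" = true
instance (products : List (List (String × String))) : Decidable (Pre_generate products) := by
  unfold Pre_generate; infer_instance
def pvWitness_generate : (List (List (String × String))) :=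
  [[("data_de_fabricacao", "2020-01-01"), ("data_de_validade", "2022-01-01"), ("nome_da_empresa", "Acme")]]

def Spec_generate (products : List (List (String × String))) (out : String) : Prop := out = generate_alt products
instance (products : List (List (String × String))) (out : String) : Decidable (Spec_generate products out) := by unfold Spec_generate; infer_instance

-- ===== CLAIM (what is proved, stated in full; the proofs are below) =====
def Claim_equal_generate : Prop := ∀ (products : List (List (String × String))), Dom_generate products → Pre_generate products → Spec_generate products (generate products)

-- ===== LEMMAS AND PROOFS =====
theorem pv_min_fold (t : List String) (x : String) :
    t.foldl pvMinStep (some x) = some (t.foldl min x) := by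
  induction t generalizing x with
  | nil => rfl
  | cons f t ih =>
    simp only [List.foldl_cons, pvMinStep]
    have : (if f < x then some f else some x) = some (min x f) := by
      by_cases h : f < x
      · rw [if_pos h, min_def, if_neg (not_le.mpr h)]
      · rw [if_neg h, min_def, if_pos (not_lt.mp h)]
    rw [this, ih]

def pvEnc (o : Option (String × Int)) : Option String × Int :=
  match o with
  | none => (none, 0)
  | some r => (some r.1, r.2)

def pvMaxStep (acc : Option (String × Int)) (kv : String × Int) : Option (String × Int) :=
  match acc with
  | none => some kv
  | some m => if m.2 < kv.2 then some kv else some m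

theorem pv_max?_eq_foldl (l : List (String × Int)) :
    PySem.List.max? l (fun kv => kv.2) = l.foldl pvMaxStep none := by
  unfold PySem.List.max?
  generalize (none : Option (String × Int)) = o
  induction l generalizing o with
  | nil => rfl
  | cons kv t ih =>
    simp only [List.foldl_cons]
    rw [ih]
    congr 1
    cases o <;> rfl

theorem pv_sel_fold (l : List (String × Int)) (h : ∀ kv ∈ l, 0 < kv.2) (o : Option (String × Int)) :
    l.foldl (fun (b : Option String × Int) kv => if b.2 < kv.2 then (some kv.1, kv.2) else b) (pvEnc o)
    = pvEnc (l.foldl pvMaxStep o) := by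
  induction l generalizing o with
  | nil => rfl
  | cons kv t ih =>
    have hkv : (0:Int) < kv.2 := h kv (List.mem_cons_self ..)
    have ht : ∀ p ∈ t, 0 < p.2 := fun p hp => h p (List.mem_cons_of_mem _ hp)
    simp only [List.foldl_cons]
    cases o with
    | none =>
      simpa only [pvEnc, pvMaxStep, if_pos hkv] using ih ht (some kv)
    | some r =>
      by_cases hr : r.2 < kv.2
      · simpa only [pvEnc, pvMaxStep, if_pos hr] using ih ht (some kv)
      · simpa only [pvEnc, pvMaxStep, if_neg hr] using ih ht (some r)

theorem pv_counter_pos (xs : List String) :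
    ∀ kv ∈ (PySem.Dict.counter xs).items, (0:Int) < kv.2 := by
  intro kv hm
  rw [PySem.Dict.items_counter] at hm
  obtain ⟨k, hk, rfl⟩ := List.mem_map.mp hm
  have hx : k ∈ xs := (PySem.Set.mem_ofList xs k).mp hk
  have : 0 < List.count k xs := List.count_pos_iff.mpr hx
  simpa using (Int.ofNat_lt.mpr this)

theorem pv_main (products : List (List (String × String))) (hne : products ≠ []) :
    generate products = generate_alt products := by
  obtain ⟨p, ps, rfl⟩ := List.exists_cons_of_ne_nil hne
  simp only [generate, generate_alt]
  -- split B's fold into three independent folds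
  rw [PySem.List.foldl_prod_mk
      (f := fun (o : Option String) q => pvMinStep o (pvGet q "data_de_fabricacao"))
      (g := fun (s : Option String × PySem.Dict String Int) q =>
        (pvMinStep s.1 (pvGet q "data_de_validade"),
         s.2.insert (pvGet q "nome_da_empresa") (s.2.getD (pvGet q "nome_da_empresa") 0 + 1)))]
  rw [PySem.List.foldl_prod_mk
      (f := fun (o : Option String) q => pvMinStep o (pvGet q "data_de_validade"))
      (g := fun (d : PySem.Dict String Int) q =>
        d.insert (pvGet q "nome_da_empresa") (d.getD (pvGet q "nome_da_empresa") 0 + 1))]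
  -- B's minima folds agree with A's min? over the mapped lists
  have hminB : ∀ (k : String),
      (p :: ps).foldl (fun (o : Option String) q => pvMinStep o (pvGet q k)) none
      = some ((ps.map (fun q => pvGet q k)).foldl min (pvGet p k)) := by
    intro k
    rw [List.foldl_cons, show pvMinStep none (pvGet p k) = some (pvGet p k) from rfl,
        ← List.foldl_map (f := fun q => pvGet q k) (g := pvMinStep)]
    exact pv_min_fold _ _
  have hminA : ∀ (k : String),
      PySem.List.min? ((p :: ps).map (fun q => pvGet q k)) (fun y => y)
      = some ((ps.map (fun q => pvGet q k)).foldl min (pvGet p k)) := by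
    intro k
    rw [List.map_cons]
    exact PySem.List.min?_id_cons _ _
  -- B's count dict is Counter of the mapped names
  have hcnt :
      (p :: ps).foldl (fun (d : PySem.Dict String Int) q =>
          d.insert (pvGet q "nome_da_empresa") (d.getD (pvGet q "nome_da_empresa") 0 + 1)) PySem.Dict.empty
      = PySem.Dict.counter ((p :: ps).map (fun q => pvGet q "nome_da_empresa")) := by
    rw [← List.foldl_map (f := fun q => pvGet q "nome_da_empresa")
          (g := fun (d : PySem.Dict String Int) x => d.insert x (d.getD x 0 + 1))]
    exact PySem.Dict.foldl_insert_getD_add_one_eq_counter _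
  rw [hminA, hminA, hminB, hminB, hcnt]
  -- the selection loop is max? (first maximal element)
  have hsel :
      (PySem.Dict.counter ((p :: ps).map (fun q => pvGet q "nome_da_empresa"))).items.foldl
        (fun (b : Option String × Int) kv => if b.2 < kv.2 then (some kv.1, kv.2) else b) (none, 0)
      = pvEnc (PySem.List.max?
          (PySem.Dict.counter ((p :: ps).map (fun q => pvGet q "nome_da_empresa"))).items (fun kv => kv.2)) := by
    rw [show ((none, 0) : Option String × Int) = pvEnc none from rfl,
        pv_sel_fold _ (pv_counter_pos _) none, pv_max?_eq_foldl]
  rw [hsel]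
  cases PySem.List.max?
      (PySem.Dict.counter ((p :: ps).map (fun q => pvGet q "nome_da_empresa"))).items (fun kv => kv.2) with
  | none => rfl
  | some r => rfl

-- ===== VERDICT (by name: the statement is the Claim_ definition above) =====
theorem generate_spec : Claim_equal_generate := by
  intro products _ hpre
  unfold Spec_generate
  exact pv_main products hpre.1
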